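-- pv_equiv track=rewrite | github.com/UndiFineD/DebVisor | scripts/fix_comments_and_blanks.py | fix_blank_line_whitespace
-- ===== SOURCE A (Python) =====
-- def fix_blank_line_whitespace(content: str) -> tuple[str, bool]:
--     """Fix W293: blank line contains whitespace."""
--     lines = content.split('\n')
--     modified = False
--     new_lines = []
--
--     for line in lines:
--         if line.strip() == '':
--             # Blank line - should have no whitespace
--             if line != '':
--                 modified = True
--             new_lines.append('')
--         else:
--             new_lines.append(line)
--
--     return '\n'.join(new_lines), modified
-- ===== SOURCE B (Python) =====
-- def fix_blank_line_whitespace(content: str) -> tuple[str, bool]: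
--     """Fix W293: blank line contains whitespace."""
--     res = []
--     buf = []
--     blank = True
--     modified = False
--     for ch in content:
--         if ch == '\n':
--             if blank:
--                 if buf:
--                     modified = True
--             else:
--                 res.extend(buf)
--             res.append('\n')
--             buf = []
--             blank = True
--         else:
--             buf.append(ch)
--             if not ch.isspace():
--                 blank = False
--     if blank:
--         if buf:
--             modified = True
--     else:
--         res.extend(buf)
--     return ''.join(res), modified
-- ===== Notes on version B (the rewrite author's own statement) =====
-- stated objective: alternative
-- what changed: Replaces A's split-into-lines / per-line strip / flag-in-loop / join pipeline by a single character-level scan that keeps a line buffer and a blankness flag and emits output as it goes, never materialising the list of lines or calling strip/split/join.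
import Mathlib
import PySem

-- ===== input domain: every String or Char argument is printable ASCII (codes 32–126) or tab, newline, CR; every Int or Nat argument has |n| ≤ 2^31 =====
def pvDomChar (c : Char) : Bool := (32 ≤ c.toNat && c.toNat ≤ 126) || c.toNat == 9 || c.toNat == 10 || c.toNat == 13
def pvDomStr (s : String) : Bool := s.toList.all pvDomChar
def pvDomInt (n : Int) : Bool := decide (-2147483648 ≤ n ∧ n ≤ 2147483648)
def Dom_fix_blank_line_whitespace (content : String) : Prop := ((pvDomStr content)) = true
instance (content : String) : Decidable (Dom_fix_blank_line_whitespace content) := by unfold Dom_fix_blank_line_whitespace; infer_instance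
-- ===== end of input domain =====

-- B replaces A's split/strip/join pipeline by a single character-level scan that tracks the
-- current line buffer and a blankness flag, never materialising the list of lines (objective: alternative).

-- ===== PORT A =====
def fix_blank_line_whitespace (content : String) : String × Bool :=
  let lines : List String := (PySem.Str.split? content "\n").getD []
  let st :=
    lines.foldl
      (fun (st : List String × Bool) line =>
        if PySem.Str.strip line = "" then
          (st.1 ++ [""], if line ≠ "" then true else st.2)
        else
          (st.1 ++ [line], st.2))
      ([], false)
  (PySem.Str.join "\n" st.1, st.2)

-- ===== PORT B =====
-- state = (res, buf, blank, modified), exactly Source B's four locals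
def fix_blank_line_whitespace_alt (content : String) : String × Bool :=
  let st :=
    content.toList.foldl
      (fun (st : List Char × List Char × Bool × Bool) ch =>
        if ch = '\n' then
          let mod' := if st.2.2.1 then (if st.2.1.isEmpty then st.2.2.2 else true) else st.2.2.2
          let res' := if st.2.2.1 then st.1 else st.1 ++ st.2.1
          (res' ++ ['\n'], [], true, mod')
        else
          (st.1, st.2.1 ++ [ch], st.2.2.1 && PySem.Chars.isspace ch, st.2.2.2))
      ([], [], true, false)
  let mod := if st.2.2.1 then (if st.2.1.isEmpty then st.2.2.2 else true) else st.2.2.2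
  let res := if st.2.2.1 then st.1 else st.1 ++ st.2.1
  (String.ofList res, mod)

-- ===== PRECONDITION & SPEC =====
def Spec_fix_blank_line_whitespace (content : String) (out : String × Bool) : Prop := out = fix_blank_line_whitespace_alt content
instance (content : String) (out : String × Bool) : Decidable (Spec_fix_blank_line_whitespace content out) := by unfold Spec_fix_blank_line_whitespace; infer_instance

-- ===== CLAIM (what is proved, stated in full; the proofs are below) =====
def Claim_equal_fix_blank_line_whitespace : Prop := ∀ (content : String), Dom_fix_blank_line_whitespace content → Spec_fix_blank_line_whitespace content (fix_blank_line_whitespace content)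

-- ===== LEMMAS AND PROOFS =====

-- the lines of a character stream, split at '\n' (the common spec both ports are reduced to)
def pvLines : List Char → List (List Char)
  | [] => [[]]
  | c :: cs => if c = '\n' then [] :: pvLines cs else (pvLines cs).modifyHead (c :: ·)

def pvClean (l : List Char) : List Char := if l.all PySem.Chars.isspace then [] else l
def pvFlag (l : List Char) : Bool := l.all PySem.Chars.isspace && !l.isEmpty

theorem pvLines_ne_nil (cs : List Char) : pvLines cs ≠ [] := by
  cases cs with
  | nil => simp [pvLines]
  | cons c cs =>
    simp only [pvLines]
    split
    · simp
    · cases h : pvLines cs with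
      | nil => exact absurd h (pvLines_ne_nil cs)
      | cons a t => simp [List.modifyHead]

theorem pv_strip_eq_nil_iff (l : List Char) :
    PySem.Chars.strip l = [] ↔ l.all PySem.Chars.isspace = true := by
  simp only [PySem.Chars.strip, PySem.Chars.rstrip, PySem.Chars.lstrip,
    List.reverse_eq_nil_iff, List.dropWhile_eq_nil_iff, List.mem_reverse, List.all_eq_true]
  constructor
  · intro h x hx
    have hx' : x ∈ List.takeWhile PySem.Chars.isspace l ++ List.dropWhile PySem.Chars.isspace l := by
      rw [List.takeWhile_append_dropWhile]; exact hx
    rcases List.mem_append.1 hx' with h1 | h2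
    · exact List.mem_takeWhile_imp h1
    · exact h x h2
  · intro h x hx
    exact h x (List.dropWhile_sublist (p := PySem.Chars.isspace) (l := l) |>.mem hx)

-- A's loop over the split lines, from any accumulator
theorem pv_A_loop (lines acc : List String) (b : Bool) :
    lines.foldl
      (fun (st : List String × Bool) line =>
        if PySem.Str.strip line = "" then
          (st.1 ++ [""], if line ≠ "" then true else st.2)
        else
          (st.1 ++ [line], st.2))
      (acc, b)
    = (acc ++ lines.map (fun l => if PySem.Str.strip l = "" then "" else l),
       b || lines.any (fun l => decide (PySem.Str.strip l = "") && decide (l ≠ ""))) := by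
  induction lines generalizing acc b with
  | nil => simp
  | cons l t ih =>
    rw [List.foldl_cons]
    by_cases h : PySem.Str.strip l = ""
    · by_cases hl : l = ""
      · subst hl
        simp only [if_pos h, ih, List.map_cons, List.any_cons]
        simp [h]
      · simp only [if_pos h, ih, List.map_cons, List.any_cons]
        simp [hl, h]
    · simp only [if_neg h, ih, List.map_cons, List.any_cons]
      simp [h]

theorem pv_ofList_eq_empty_iff (l : List Char) : (String.ofList l = "") ↔ l = [] := by
  constructor
  · intro h
    have := congrArg String.toList h
    simpa using this
  · rintro rfl; rfl

theorem pv_strip_ofList (l : List Char) :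
    PySem.Str.strip (String.ofList l) = String.ofList (PySem.Chars.strip l) := by
  have h := PySem.Str.toList_strip (String.ofList l)
  rw [String.toList_ofList] at h
  rw [← String.ofList_toList (s := PySem.Str.strip (String.ofList l)), h]

-- the splitter: PySem's splitOn on a single '\n' separator is pvLines
theorem pv_go_spec (fuel : Nat) (l cur : List Char) (acc : List (List Char)) (h : l.length < fuel) :
    PySem.Chars.splitOn.go ['\n'] fuel l cur acc
      = acc.reverse ++ (pvLines l).modifyHead (cur.reverse ++ ·) := by
  induction fuel generalizing l cur acc with
  | zero => omega
  | succ fuel ih =>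
    cases l with
    | nil =>
      simp [PySem.Chars.splitOn.go, pvLines]
    | cons c rest =>
      by_cases hc : c = '\n'
      · subst hc
        have hpre : List.isPrefixOf ['\n'] ('\n' :: rest) = true := by
          simp [List.isPrefixOf]
        rw [show PySem.Chars.splitOn.go ['\n'] (fuel + 1) ('\n' :: rest) cur acc
              = PySem.Chars.splitOn.go ['\n'] fuel rest [] (cur.reverse :: acc) by
            simp [PySem.Chars.splitOn.go, hpre]]
        rw [ih rest [] (cur.reverse :: acc) (by simp at h; omega)]
        cases hl : pvLines rest with
        | nil => exact absurd hl (pvLines_ne_nil rest)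
        | cons a t =>
          simp [pvLines, hl, List.modifyHead]
      · have hpre : List.isPrefixOf ['\n'] (c :: rest) = false := by
          simp [List.isPrefixOf]
          exact fun e => hc e.symm
        rw [show PySem.Chars.splitOn.go ['\n'] (fuel + 1) (c :: rest) cur acc
              = PySem.Chars.splitOn.go ['\n'] fuel rest (c :: cur) acc by
            simp [PySem.Chars.splitOn.go, hpre]]
        rw [ih _ (c :: cur) acc (by simp at h; omega)]
        cases hl : pvLines rest with
        | nil => exact absurd hl (pvLines_ne_nil rest)
        | cons a t =>
          simp [pvLines, hc, hl, List.modifyHead]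

theorem pv_splitOn_eq_pvLines (cs : List Char) :
    PySem.Chars.splitOn cs ['\n'] = pvLines cs := by
  rw [show PySem.Chars.splitOn cs ['\n'] = PySem.Chars.splitOn.go ['\n'] (cs.length + 1) cs [] [] from rfl]
  rw [pv_go_spec (cs.length + 1) cs [] [] (by omega)]
  cases hl : pvLines cs with
  | nil => exact absurd hl (pvLines_ne_nil cs)
  | cons a t => simp [List.modifyHead]

-- B's step function and finalizer (names for the lambdas in fix_blank_line_whitespace_alt)
def pvStepB (st : List Char × List Char × Bool × Bool) (ch : Char) : List Char × List Char × Bool × Bool :=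
  if ch = '\n' then
    let mod' := if st.2.2.1 then (if st.2.1.isEmpty then st.2.2.2 else true) else st.2.2.2
    let res' := if st.2.2.1 then st.1 else st.1 ++ st.2.1
    (res' ++ ['\n'], [], true, mod')
  else
    (st.1, st.2.1 ++ [ch], st.2.2.1 && PySem.Chars.isspace ch, st.2.2.2)

def pvFinB (st : List Char × List Char × Bool × Bool) : List Char × Bool :=
  ((if st.2.2.1 then st.1 else st.1 ++ st.2.1),
   (if st.2.2.1 then (if st.2.1.isEmpty then st.2.2.2 else true) else st.2.2.2))

-- B's loop, from any state whose blank flag agrees with its buffer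
theorem pv_B_loop (cs : List Char) (res buf : List Char) (mod : Bool) :
    pvFinB (cs.foldl pvStepB (res, buf, buf.all PySem.Chars.isspace, mod))
    = (res ++ PySem.Chars.join ['\n'] (((pvLines cs).modifyHead (buf ++ ·)).map pvClean),
       mod || ((pvLines cs).modifyHead (buf ++ ·)).any pvFlag) := by
  induction cs generalizing res buf mod with
  | nil =>
    simp only [List.foldl_nil, pvFinB, pvLines, List.modifyHead, List.map, PySem.Chars.join,
      List.intercalate, List.intersperse, List.flatten, pvClean, pvFlag, List.any_cons, List.any_nil]
    by_cases hb : buf.all PySem.Chars.isspace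
    · cases buf with
      | nil => simp [hb]
      | cons x b => simp [hb, List.isEmpty]
    · simp [hb, Bool.false_and]
  | cons c cs ih =>
    rw [List.foldl_cons]
    by_cases hc : c = '\n'
    · subst hc
      have hstep : pvStepB (res, buf, buf.all PySem.Chars.isspace, mod) '\n'
          = ((if buf.all PySem.Chars.isspace then res else res ++ buf) ++ ['\n'], ([] : List Char),
             ([] : List Char).all PySem.Chars.isspace,
             (if buf.all PySem.Chars.isspace then (if buf.isEmpty then mod else true) else mod)) := by
        simp [pvStepB]
      rw [hstep, ih]
      cases hl : pvLines cs with
      | nil => exact absurd hl (pvLines_ne_nil cs)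
      | cons a t =>
        simp only [pvLines, reduceIte, hl, List.modifyHead, List.nil_append, List.append_nil,
          List.map_cons, List.any_cons, PySem.Chars.join_cons_cons]
        by_cases hb : buf.all PySem.Chars.isspace
        · cases buf with
          | nil => simp [pvClean, pvFlag, hb, List.isEmpty]
          | cons x b =>
            simp [pvClean, pvFlag, hb, List.isEmpty, Bool.or_comm]
        · simp only [pvClean, pvFlag, hb]
          cases buf with
          | nil => simp at hb
          | cons x b =>
            simp [List.isEmpty, List.append_assoc]
    · have hstep : pvStepB (res, buf, buf.all PySem.Chars.isspace, mod) c
          = (res, buf ++ [c], (buf ++ [c]).all PySem.Chars.isspace, mod) := by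
        simp [pvStepB, hc, List.all_append]
      rw [hstep, ih]
      cases hl : pvLines cs with
      | nil => exact absurd hl (pvLines_ne_nil cs)
      | cons a t =>
        simp [pvLines, hc, hl, List.modifyHead]

theorem pv_cleanS (l : List Char) :
    (if PySem.Str.strip (String.ofList l) = "" then "" else String.ofList l)
      = String.ofList (pvClean l) := by
  rw [pv_strip_ofList]
  by_cases h : l.all PySem.Chars.isspace
  · rw [if_pos (by rw [pv_ofList_eq_empty_iff]; exact (pv_strip_eq_nil_iff l).2 h)]
    simp [pvClean, h]
  · rw [if_neg (fun (e : String.ofList (PySem.Chars.strip l) = "") =>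
        h ((pv_strip_eq_nil_iff l).1 ((pv_ofList_eq_empty_iff _).1 e)))]
    simp [pvClean, h]

theorem pv_flagS (l : List Char) :
    (decide (PySem.Str.strip (String.ofList l) = "") && decide (String.ofList l ≠ "")) = pvFlag l := by
  rw [pv_strip_ofList]
  have h1 : decide (String.ofList (PySem.Chars.strip l) = "") = l.all PySem.Chars.isspace := by
    by_cases h : l.all PySem.Chars.isspace
    · simp [h, (pv_ofList_eq_empty_iff _).2 ((pv_strip_eq_nil_iff l).2 h)]
    · simp [h]
      exact fun e => h ((pv_strip_eq_nil_iff l).1 e)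
  have h2 : decide (String.ofList l ≠ "") = !l.isEmpty := by
    by_cases h : l = []
    · subst h; simp
    · simp [h, (pv_ofList_eq_empty_iff l).not.2 h]
  rw [h1, h2, pvFlag]

theorem pv_join_ofList (M : List (List Char)) :
    PySem.Str.join "\n" (M.map String.ofList) = String.ofList (PySem.Chars.join ['\n'] M) := by
  rw [← String.ofList_toList (s := PySem.Str.join "\n" (M.map String.ofList)),
    PySem.Str.toList_join]
  simp only [List.map_map]
  have : (String.toList ∘ String.ofList) = fun (x : List Char) => x := by
    funext x; simp
  simp [this]

theorem pv_lines_eq (content : String) :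
    (PySem.Str.split? content "\n").getD [] = (pvLines content.toList).map String.ofList := by
  rw [show PySem.Str.split? content "\n"
        = Option.map (fun x => List.map String.ofList x) (PySem.Chars.split? content.toList ['\n']) from rfl]
  rw [show PySem.Chars.split? content.toList ['\n']
        = some (PySem.Chars.splitOn content.toList ['\n']) by simp [PySem.Chars.split?]]
  rw [pv_splitOn_eq_pvLines]
  rfl

theorem pv_modifyHead_nil_append (L : List (List Char)) :
    L.modifyHead (fun x => [] ++ x) = L := by
  cases L <;> simp [List.modifyHead]


-- ===== VERDICT (by name: the statement is the Claim_ definition above) =====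
theorem fix_blank_line_whitespace_spec : Claim_equal_fix_blank_line_whitespace := by
  intro content _
  unfold Spec_fix_blank_line_whitespace fix_blank_line_whitespace
  have hB : fix_blank_line_whitespace_alt content
      = (String.ofList (pvFinB (content.toList.foldl pvStepB ([], [], true, false))).1,
         (pvFinB (content.toList.foldl pvStepB ([], [], true, false))).2) := rfl
  have hloop := pv_B_loop content.toList [] [] false
  simp only [List.all_nil, pv_modifyHead_nil_append, Bool.false_or] at hloop
  rw [hB, hloop]
  simp only [pv_lines_eq, pv_A_loop, List.nil_append, Bool.false_or]
  rw [List.map_map, List.any_map]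
  simp only [Function.comp_def, pv_cleanS, pv_flagS]
  rw [show (fun l => String.ofList (pvClean l)) = (String.ofList ∘ pvClean) from rfl,
    ← List.map_map, pv_join_ofList]
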